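-- pv_equiv track=rewrite | github.com/betteryourpractice/truecore-updates | TrueCoreIntel/review/review_engine.py | compress_why_weak
-- ===== SOURCE A (Python) =====
-- def compress_why_weak(reasons):
--     """
--     Reduce redundancy and limit to highest-signal explanations.
--     """
--
--     if not reasons:
--         return []
--     grouped = {
--         "critical": [],
--         "clinical": [],
--         "documents": [],
--         "conflicts": [],
--         "other": [],
--     }
--
--     for r in reasons:
--         rl = r.lower()
--
--         if "critical" in rl or "missing required field" in rl:
--             grouped["critical"].append(r)
--         elif "clinical" in rl or "diagnosis" in rl or "mri" in rl:
--             grouped["clinical"].append(r)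
--         elif "document" in rl:
--             grouped["documents"].append(r)
--         elif "conflict" in rl:
--             grouped["conflicts"].append(r)
--         else:
--             grouped["other"].append(r)
--
--     ordered = (
--         grouped["critical"] +
--         grouped["clinical"] +
--         grouped["documents"] +
--         grouped["conflicts"] +
--         grouped["other"]
--     )
--
--     # Deduplicate while preserving order
--     seen = set()
--     deduped = []
--     for item in ordered:
--         if item not in seen:
--             seen.add(item)
--             deduped.append(item)
--
--     # Cap output (important)
--     return deduped[:5]
-- ===== SOURCE B (Python) =====
-- def compress_why_weak(reasons):
--     """
--     Reduce redundancy and limit to highest-signal explanations.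
--     Alternative decomposition: rank each reason by bucket, build the ordered
--     sequence by five filter passes, then dedup with an early stop at 5 items.
--     """
--     def rank(r):
--         rl = r.lower()
--         if "critical" in rl or "missing required field" in rl:
--             return 0
--         if "clinical" in rl or "diagnosis" in rl or "mri" in rl:
--             return 1
--         if "document" in rl:
--             return 2
--         if "conflict" in rl:
--             return 3
--         return 4
--
--     ordered = [r for k in range(5) for r in reasons if rank(r) == k]
--     out = []
--     for r in ordered:
--         if r not in out:
--             out.append(r)
--             if len(out) == 5:
--                 break
--     return out
-- ===== Notes on version B (the rewrite author's own statement) =====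
-- stated objective: alternative
-- what changed: Replaces the single-pass dict-of-buckets plus full dedup-then-slice with a rank function, five filter passes building the ordered list, and a dedup loop that stops as soon as 5 items are collected.
import Mathlib
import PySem

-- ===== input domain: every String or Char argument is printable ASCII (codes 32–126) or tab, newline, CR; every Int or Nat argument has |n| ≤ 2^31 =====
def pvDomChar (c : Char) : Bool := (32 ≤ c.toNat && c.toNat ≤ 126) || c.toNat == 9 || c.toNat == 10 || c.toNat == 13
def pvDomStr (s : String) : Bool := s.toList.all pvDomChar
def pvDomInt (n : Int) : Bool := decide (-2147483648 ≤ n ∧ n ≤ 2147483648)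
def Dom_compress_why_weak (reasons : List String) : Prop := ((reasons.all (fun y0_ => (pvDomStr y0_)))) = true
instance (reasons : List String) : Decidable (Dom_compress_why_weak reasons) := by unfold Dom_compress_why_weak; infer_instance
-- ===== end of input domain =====

-- B replaces A's one-pass bucket dict + full dedup-then-slice with a rank function,
-- five filter passes, and a dedup loop that stops early at 5 items (alternative decomposition).


-- ===== PORT A =====
-- state: the five bucket lists (critical, clinical, documents, conflicts, other)
def cwwBucketStep (g : List String × List String × List String × List String × List String)
    (r : String) : List String × List String × List String × List String × List String :=
  if PySem.Str.isIn "critical" (PySem.Str.lower r) || PySem.Str.isIn "missing required field" (PySem.Str.lower r) then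
    (g.1 ++ [r], g.2.1, g.2.2.1, g.2.2.2.1, g.2.2.2.2)
  else if PySem.Str.isIn "clinical" (PySem.Str.lower r) || PySem.Str.isIn "diagnosis" (PySem.Str.lower r) || PySem.Str.isIn "mri" (PySem.Str.lower r) then
    (g.1, g.2.1 ++ [r], g.2.2.1, g.2.2.2.1, g.2.2.2.2)
  else if PySem.Str.isIn "document" (PySem.Str.lower r) then
    (g.1, g.2.1, g.2.2.1 ++ [r], g.2.2.2.1, g.2.2.2.2)
  else if PySem.Str.isIn "conflict" (PySem.Str.lower r) then
    (g.1, g.2.1, g.2.2.1, g.2.2.2.1 ++ [r], g.2.2.2.2)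
  else
    (g.1, g.2.1, g.2.2.1, g.2.2.2.1, g.2.2.2.2 ++ [r])

def compress_why_weak (reasons : List String) : List String :=
  if reasons.isEmpty then [] else
  let g := reasons.foldl cwwBucketStep ([], [], [], [], [])
  let ordered := g.1 ++ g.2.1 ++ g.2.2.1 ++ g.2.2.2.1 ++ g.2.2.2.2
  let dd := ordered.foldl
    (fun (p : PySem.Set String × List String) item =>
      if PySem.Set.contains p.1 item then p
      else (PySem.Set.add p.1 item, p.2 ++ [item]))
    (PySem.Set.empty, [])
  PySem.List.slice dd.2 none (some 5)

-- ===== PORT B =====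
def cwwRank (r : String) : Int :=
  if PySem.Str.isIn "critical" (PySem.Str.lower r) || PySem.Str.isIn "missing required field" (PySem.Str.lower r) then 0
  else if PySem.Str.isIn "clinical" (PySem.Str.lower r) || PySem.Str.isIn "diagnosis" (PySem.Str.lower r) || PySem.Str.isIn "mri" (PySem.Str.lower r) then 1
  else if PySem.Str.isIn "document" (PySem.Str.lower r) then 2
  else if PySem.Str.isIn "conflict" (PySem.Str.lower r) then 3
  else 4

-- dedup with an early stop once 5 items are collected
def cwwCapDedup (out : List String) : List String → List String
  | [] => out
  | r :: rest =>
    if r ∈ out then cwwCapDedup out rest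
    else if (out ++ [r]).length = 5 then out ++ [r]
    else cwwCapDedup (out ++ [r]) rest

def compress_why_weak_alt (reasons : List String) : List String :=
  let ordered := (PySem.List.pyRange 0 5 1).flatMap
    (fun k => reasons.filter (fun r => cwwRank r == k))
  cwwCapDedup [] ordered

-- ===== PRECONDITION & SPEC =====
def Spec_compress_why_weak (reasons : List String) (out : List String) : Prop := out = compress_why_weak_alt reasons
instance (reasons : List String) (out : List String) : Decidable (Spec_compress_why_weak reasons out) := by unfold Spec_compress_why_weak; infer_instance

-- ===== CLAIM (what is proved, stated in full; the proofs are below) =====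
def Claim_equal_compress_why_weak : Prop := ∀ (reasons : List String), Dom_compress_why_weak reasons → Spec_compress_why_weak reasons (compress_why_weak reasons)

-- ===== LEMMAS AND PROOFS =====

-- A's bucket step, expressed through B's rank
theorem cwwStep_rank (g : List String × List String × List String × List String × List String)
    (x : String) :
    cwwBucketStep g x =
      (if cwwRank x == 0 then g.1 ++ [x] else g.1,
       if cwwRank x == 1 then g.2.1 ++ [x] else g.2.1,
       if cwwRank x == 2 then g.2.2.1 ++ [x] else g.2.2.1,
       if cwwRank x == 3 then g.2.2.2.1 ++ [x] else g.2.2.2.1,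
       if cwwRank x == 4 then g.2.2.2.2 ++ [x] else g.2.2.2.2) := by
  unfold cwwBucketStep cwwRank
  generalize (PySem.Str.isIn "critical" (PySem.Str.lower x) || PySem.Str.isIn "missing required field" (PySem.Str.lower x)) = b0
  generalize (PySem.Str.isIn "clinical" (PySem.Str.lower x) || PySem.Str.isIn "diagnosis" (PySem.Str.lower x) || PySem.Str.isIn "mri" (PySem.Str.lower x)) = b1
  generalize PySem.Str.isIn "document" (PySem.Str.lower x) = b2
  generalize PySem.Str.isIn "conflict" (PySem.Str.lower x) = b3
  cases b0 <;> cases b1 <;> cases b2 <;> cases b3 <;> simp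

theorem cwwRank_cases (x : String) :
    cwwRank x = 0 ∨ cwwRank x = 1 ∨ cwwRank x = 2 ∨ cwwRank x = 3 ∨ cwwRank x = 4 := by
  unfold cwwRank
  generalize (PySem.Str.isIn "critical" (PySem.Str.lower x) || PySem.Str.isIn "missing required field" (PySem.Str.lower x)) = b0
  generalize (PySem.Str.isIn "clinical" (PySem.Str.lower x) || PySem.Str.isIn "diagnosis" (PySem.Str.lower x) || PySem.Str.isIn "mri" (PySem.Str.lower x)) = b1
  generalize PySem.Str.isIn "document" (PySem.Str.lower x) = b2
  generalize PySem.Str.isIn "conflict" (PySem.Str.lower x) = b3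
  cases b0 <;> cases b1 <;> cases b2 <;> cases b3 <;> simp

-- the bucket fold is five filters
theorem cww_buckets (xs : List String)
    (c cl d co o : List String) :
    xs.foldl cwwBucketStep (c, cl, d, co, o) =
      (c ++ xs.filter (fun r => cwwRank r == 0),
       cl ++ xs.filter (fun r => cwwRank r == 1),
       d ++ xs.filter (fun r => cwwRank r == 2),
       co ++ xs.filter (fun r => cwwRank r == 3),
       o ++ xs.filter (fun r => cwwRank r == 4)) := by
  induction xs generalizing c cl d co o with
  | nil => simp
  | cons x xs ih =>
    rw [List.foldl_cons, cwwStep_rank]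
    rcases cwwRank_cases x with h | h | h | h | h <;>
      simp [h, ih]

-- the dedup fold only appends to its accumulator
theorem cww_fold_append (ys : List String) (t : PySem.Set String) (a : List String) :
    ∃ b, (ys.foldl
      (fun (p : PySem.Set String × List String) item =>
        if PySem.Set.contains p.1 item then p
        else (PySem.Set.add p.1 item, p.2 ++ [item])) (t, a)).2 = a ++ b := by
  induction ys generalizing t a with
  | nil => exact ⟨[], by simp⟩
  | cons y ys ihy =>
    rw [List.foldl_cons]
    by_cases hy : PySem.Set.contains t y = true
    · rw [if_pos hy]; exact ihy t a
    · rw [if_neg hy]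
      obtain ⟨b, hb⟩ := ihy (PySem.Set.add t y) (a ++ [y])
      exact ⟨y :: b, by rw [hb]; simp⟩

-- the capped dedup loop is A's seen-set dedup followed by take 5
theorem cww_cap_eq_take (xs : List String) (s : PySem.Set String) (out : List String)
    (hmem : ∀ y, y ∈ s ↔ y ∈ out) (hlen : out.length < 5) :
    cwwCapDedup out xs =
      (xs.foldl
        (fun (p : PySem.Set String × List String) item =>
          if PySem.Set.contains p.1 item then p
          else (PySem.Set.add p.1 item, p.2 ++ [item]))
        (s, out)).2.take 5 := by
  induction xs generalizing s out with
  | nil =>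
    simp [cwwCapDedup, List.take_of_length_le (Nat.le_of_lt hlen)]
  | cons x xs ih =>
    rw [List.foldl_cons]
    by_cases hx : x ∈ out
    · have hc : PySem.Set.contains s x = true := by
        simp [(hmem x).2 hx]
      rw [if_pos hc]
      simp only [cwwCapDedup, if_pos hx]
      exact ih s out hmem hlen
    · have hc : ¬ PySem.Set.contains s x = true := by
        simp only [PySem.Set.contains_iff]
        intro h; exact hx ((hmem x).1 h)
      rw [if_neg hc]
      simp only [cwwCapDedup, if_neg hx]
      by_cases h5 : (out ++ [x]).length = 5
      · rw [if_pos h5]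
        obtain ⟨b, hb⟩ := cww_fold_append xs (PySem.Set.add s x) (out ++ [x])
        rw [hb, List.take_append_of_le_length (by omega), List.take_of_length_le (by omega)]
      · rw [if_neg h5]
        refine ih (PySem.Set.add s x) (out ++ [x]) ?_ ?_
        · intro y
          rw [PySem.Set.mem_add]
          simp [hmem y, or_comm]
        · have : (out ++ [x]).length = out.length + 1 := by simp
          omega

-- ===== VERDICT (by name: the statement is the Claim_ definition above) =====
theorem compress_why_weak_spec : Claim_equal_compress_why_weak := by
  intro reasons _
  show compress_why_weak reasons = compress_why_weak_alt reasons
  have hrange : PySem.List.pyRange 0 5 1 = [0, 1, 2, 3, 4] := by decide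
  have hslice : ∀ (l : List String), PySem.List.slice l none (some 5) = l.take 5 := by
    intro l
    have h := PySem.List.slice_to_natCast (xs := l) (b := 5)
    simpa using h
  unfold compress_why_weak compress_why_weak_alt
  rcases reasons with _ | ⟨r, rs⟩
  · simp [hrange, cwwCapDedup]
  · simp only [List.isEmpty_cons, Bool.false_eq_true, if_false, hrange, List.flatMap_cons,
      List.flatMap_nil, List.append_nil]
    rw [cww_buckets, hslice,
      cww_cap_eq_take _ PySem.Set.empty [] (by simp [PySem.Set.empty]) (by simp)]
    simp
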